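-- pv_equiv track=rewrite | github.com/ndjenkins85/personalvibe | prompts/personalvibe/stages/5.1.2.py | _dedupe_noxfile
-- ===== SOURCE A (Python) =====
-- def _dedupe_noxfile(txt: str) -> str:
--     lines = txt.splitlines()
--     out: list[str] = []
--
--     in_final_log_to = False
--     found_log_to = 0
--     found_vibed = 0
--
--     for ln in lines:
--         if "FIXED _log_to IMPLEMENTATION" in ln:
--             in_final_log_to = True
--
--         # ---------- _log_to duplicates -----------------------------------
--         if ln.lstrip().startswith("def _log_to(") and not in_final_log_to:
--             # keep body but rename
--             ln = ln.replace("def _log_to(", "def _log_to_legacy(", 1)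
--             # add noqa for any accidental import
--             if "# noqa" not in ln:
--                 ln += "  # noqa: F401"
--             found_log_to += 1
--
--         # ---------- vibed duplicates -------------------------------------
--         if ln.lstrip().startswith("def vibed("):
--             found_vibed += 1
--             if found_vibed == 1:  # first definition only → rename
--                 ln = ln.replace("def vibed(", "def vibed_legacy(", 1)
--                 if "# noqa" not in ln:
--                     ln += "  # noqa: F401"
--
--         out.append(ln)
--
--     return "\n".join(out)
-- ===== SOURCE B (Python) =====
-- def _first_index(lines, pred):
--     for i, ln in enumerate(lines):
--         if pred(ln):
--             return i
--     return -1
--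
--
-- def _renamed(ln, old, new):
--     ln = ln.replace(old, new, 1)
--     if "# noqa" not in ln:
--         ln += "  # noqa: F401"
--     return ln
--
--
-- def _dedupe_noxfile(txt: str) -> str:
--     lines = txt.splitlines()
--     marker = _first_index(lines, lambda ln: "FIXED _log_to IMPLEMENTATION" in ln)
--     if marker < 0:
--         marker = len(lines)
--     vibed = _first_index(lines, lambda ln: ln.lstrip().startswith("def vibed("))
--     out = []
--     for i, ln in enumerate(lines):
--         if i < marker and ln.lstrip().startswith("def _log_to("):
--             ln = _renamed(ln, "def _log_to(", "def _log_to_legacy(")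
--         if i == vibed:
--             ln = _renamed(ln, "def vibed(", "def vibed_legacy(")
--         out.append(ln)
--     return "\n".join(out)
-- ===== Notes on version B (the rewrite author's own statement) =====
-- stated objective: alternative
-- what changed: Replaced A's single stateful pass with mutable in_final/found_vibed/found_log_to flags by precomputing the first marker-line index and the first vibed-def index, then rewriting each line with a stateless index-based rule (rename _log_to defs strictly before the marker index, rename the vibed def only at its first index); the unused found_log_to counter is dropped.
import Mathlib
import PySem

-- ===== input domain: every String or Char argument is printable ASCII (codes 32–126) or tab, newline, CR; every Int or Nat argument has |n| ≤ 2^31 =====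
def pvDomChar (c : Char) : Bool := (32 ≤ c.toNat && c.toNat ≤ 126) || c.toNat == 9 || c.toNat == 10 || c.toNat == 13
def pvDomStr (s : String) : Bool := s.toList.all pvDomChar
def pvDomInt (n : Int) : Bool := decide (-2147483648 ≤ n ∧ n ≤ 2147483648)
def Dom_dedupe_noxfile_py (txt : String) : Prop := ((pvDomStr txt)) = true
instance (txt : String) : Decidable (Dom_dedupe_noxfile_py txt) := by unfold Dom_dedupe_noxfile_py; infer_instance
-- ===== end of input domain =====

-- B replaces A's single stateful pass (mutable in_final/found_vibed flags) by two precomputed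
-- first-occurrence indices plus a stateless per-line rewrite; objective: alternative (same cost).

-- hand port of Python str.replace(old, new, 1): rewrite only the LEFTMOST occurrence
-- (index str.find); exact because PySem.Str.replace has no count parameter.
def pvReplace1 (s old new : String) : String :=
  let i := PySem.Str.find s old
  if i = -1 then s
  else String.ofList (s.toList.take i.toNat ++ new.toList ++ s.toList.drop (i.toNat + old.toList.length))

-- ===== PORT A =====
def pvA_loop : Bool → Int → Int → List String → List String
  | _, _, _, [] => []
  | inF, fl, fv, ln :: rest =>
    let inF1 := if PySem.Str.isIn "FIXED _log_to IMPLEMENTATION" ln then true else inF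
    let s1 : String × Int :=
      if PySem.Str.startswith (PySem.Str.lstrip ln) "def _log_to(" ∧ inF1 = false then
        let l1 := pvReplace1 ln "def _log_to(" "def _log_to_legacy("
        let l2 := if PySem.Str.isIn "# noqa" l1 = false then l1 ++ "  # noqa: F401" else l1
        (l2, fl + 1)
      else (ln, fl)
    let s2 : String × Int :=
      if PySem.Str.startswith (PySem.Str.lstrip s1.1) "def vibed(" then
        if fv + 1 = 1 then
          let l1 := pvReplace1 s1.1 "def vibed(" "def vibed_legacy("
          let l2 := if PySem.Str.isIn "# noqa" l1 = false then l1 ++ "  # noqa: F401" else l1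
          (l2, fv + 1)
        else (s1.1, fv + 1)
      else (s1.1, fv)
    s2.1 :: pvA_loop inF1 s1.2 s2.2 rest

def dedupe_noxfile_py (txt : String) : String :=
  PySem.Str.join "\n" (pvA_loop false 0 0 (PySem.Str.splitlines txt))

-- ===== PORT B =====
def pvPM (ln : String) : Bool := PySem.Str.isIn "FIXED _log_to IMPLEMENTATION" ln
def pvPV (ln : String) : Bool := PySem.Str.startswith (PySem.Str.lstrip ln) "def vibed("

def pvFirstIdx (p : String → Bool) : List String → Int
  | [] => -1
  | ln :: rest =>
    if p ln then 0
    else if pvFirstIdx p rest = -1 then -1 else pvFirstIdx p rest + 1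

def pvRenamed (ln old new : String) : String :=
  let l := pvReplace1 ln old new
  if PySem.Str.isIn "# noqa" l = false then l ++ "  # noqa: F401" else l

def pvB_rw (marker vibed i : Int) (ln : String) : String :=
  let ln1 :=
    if i < marker ∧ PySem.Str.startswith (PySem.Str.lstrip ln) "def _log_to(" = true then
      pvRenamed ln "def _log_to(" "def _log_to_legacy("
    else ln
  if i = vibed then pvRenamed ln1 "def vibed(" "def vibed_legacy(" else ln1

def dedupe_noxfile_py_alt (txt : String) : String :=
  let lines := PySem.Str.splitlines txt
  let m := pvFirstIdx pvPM lines
  let marker := if m < 0 then (lines.length : Int) else m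
  let vibed := pvFirstIdx pvPV lines
  PySem.Str.join "\n" ((PySem.List.enumerate lines).map (fun p => pvB_rw marker vibed p.1 p.2))

-- ===== PRECONDITION & SPEC =====
def Spec_dedupe_noxfile_py (txt : String) (out : String) : Prop := out = dedupe_noxfile_py_alt txt
instance (txt : String) (out : String) : Decidable (Spec_dedupe_noxfile_py txt out) := by unfold Spec_dedupe_noxfile_py; infer_instance

-- ===== CLAIM (what is proved, stated in full; the proofs are below) =====
def Claim_equal_dedupe_noxfile_py : Prop := ∀ (txt : String), Dom_dedupe_noxfile_py txt → Spec_dedupe_noxfile_py txt (dedupe_noxfile_py txt)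

-- ===== LEMMAS AND PROOFS =====

def pvBFrom (marker vibed : Int) : Int → List String → List String
  | _, [] => []
  | i, ln :: rest => pvB_rw marker vibed i ln :: pvBFrom marker vibed (i+1) rest

lemma pvEnum_map (marker vibed : Int) :
    ∀ (lines : List String) (i : Int),
      (PySem.List.enumerate lines i).map (fun p => pvB_rw marker vibed p.1 p.2)
        = pvBFrom marker vibed i lines := by
  intro lines
  induction lines with
  | nil => intro i; simp [PySem.List.enumerate_nil, pvBFrom]
  | cons ln rest ih => intro i; simp [PySem.List.enumerate_cons, pvBFrom, ih]

lemma pvFirstIdx_ge (p : String → Bool) (l : List String) : -1 ≤ pvFirstIdx p l := by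
  induction l with
  | nil => simp [pvFirstIdx]
  | cons x xs ih => simp only [pvFirstIdx]; split_ifs <;> omega


-- two different "def …(" headers cannot both start the stripped line
lemma pv_log_not_vib (s : String)
    (h : PySem.Str.startswith (PySem.Str.lstrip s) "def _log_to(" = true) :
    PySem.Str.startswith (PySem.Str.lstrip s) "def vibed(" = false := by
  rw [PySem.Str.startswith_eq, PySem.Str.toList_lstrip] at h ⊢
  rw [Bool.eq_false_iff]
  intro hv
  rw [PySem.Chars.startswith_iff] at h hv
  rcases List.prefix_or_prefix_of_prefix h hv with hp | hp
  · exact absurd hp (by decide)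
  · exact absurd hp (by decide)

-- a line of the shape  ws ++ "def _log_to_legacy(" ++ t  does not strip to a vibed def
lemma pv_not_vib_append (W T : List Char) (hW : ∀ c ∈ W, PySem.Chars.isspace c = true) :
    PySem.Chars.startswith
      (PySem.Chars.lstrip (W ++ ("def _log_to_legacy(".toList ++ T))) "def vibed(".toList = false := by
  have hLEG : "def _log_to_legacy(".toList
      = 'd'::'e'::'f'::' '::'_'::'l'::'o'::'g'::'_'::'t'::'o'::'_'::'l'::'e'::'g'::'a'::'c'::'y'::'('::[] := by decide
  have hVIB : "def vibed(".toList = 'd'::'e'::'f'::' '::'v'::'i'::'b'::'e'::'d'::'('::[] := by decide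
  rw [hLEG, hVIB]
  simp only [PySem.Chars.lstrip, List.cons_append, List.nil_append]
  rw [List.dropWhile_append, List.dropWhile_eq_nil_iff.mpr hW]
  simp [PySem.Chars.startswith, List.isPrefixOf, PySem.Chars.isspace]

-- after the _log_to rename (with or without the appended noqa tag) the stripped line
-- starts with "def _log_to_legacy(", hence not with "def vibed("
lemma pv_renamed_not_vib (s : String)
    (h : PySem.Str.startswith (PySem.Str.lstrip s) "def _log_to(" = true) :
    PySem.Str.startswith
      (PySem.Str.lstrip (pvRenamed s "def _log_to(" "def _log_to_legacy(")) "def vibed(" = false := by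
  have h' : "def _log_to(".toList <+: List.dropWhile PySem.Chars.isspace s.toList := by
    rw [PySem.Str.startswith_eq, PySem.Str.toList_lstrip] at h
    rw [← PySem.Chars.startswith_iff]
    simpa [PySem.Chars.lstrip] using h
  set L := s.toList with hL
  set W := L.takeWhile PySem.Chars.isspace with hWdef
  set R := L.dropWhile PySem.Chars.isspace with hRdef
  have hWR : W ++ R = L := List.takeWhile_append_dropWhile
  obtain ⟨T, hT⟩ := h'
  have hW : ∀ c ∈ W, PySem.Chars.isspace c = true := fun c hc => List.mem_takeWhile_imp hc
  have hinfix : "def _log_to(".toList <:+: L := ⟨W, T, by rw [List.append_assoc, hT, hWR]⟩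
  have hnn : 0 ≤ PySem.Chars.find L "def _log_to(".toList :=
    (PySem.Chars.find_nonneg_iff _ _).mpr hinfix
  obtain ⟨hfpre, hmin⟩ := PySem.Chars.find_spec hnn
  set n := (PySem.Chars.find L "def _log_to(".toList).toNat with hn
  have hdropW : L.drop W.length = R := by rw [← hWR]; exact List.drop_left
  have hWpre : "def _log_to(".toList <+: L.drop W.length := by
    rw [hdropW, ← hT]; exact ⟨T, rfl⟩
  have hle : n ≤ W.length := by
    by_contra hgt
    exact hmin W.length (by omega) hWpre
  have hge : W.length ≤ n := by
    by_contra hlt0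
    have hlt : n < W.length := by omega
    have hdrop : L.drop n = W.drop n ++ R := by
      rw [← hWR, List.drop_append]
      have h0 : n - W.length = 0 := by omega
      rw [h0, List.drop_zero]
    have hne : W.drop n ≠ [] := by
      intro h0
      have := congrArg List.length h0
      simp at this
      omega
    obtain ⟨c, w', hcw⟩ := List.exists_cons_of_ne_nil hne
    have hcW : c ∈ W := (List.drop_subset n W) (hcw ▸ List.mem_cons_self)
    have hsp := hW c hcW
    obtain ⟨u, hu⟩ := hfpre
    rw [hdrop, hcw] at hu
    have hLOG : "def _log_to(".toList
        = 'd'::'e'::'f'::' '::'_'::'l'::'o'::'g'::'_'::'t'::'o'::'('::[] := by decide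
    rw [hLOG] at hu
    simp only [List.cons_append] at hu
    injection hu with h1 _
    rw [← h1] at hsp
    exact absurd hsp (by decide)
  have hnW : n = W.length := le_antisymm hle hge
  have hfindL : PySem.Chars.find L "def _log_to(".toList = (W.length : Int) := by
    rw [← hnW, hn, Int.toNat_of_nonneg hnn]
  have hlen12 : ("def _log_to(".toList).length = 12 := by decide
  have hrep : (pvReplace1 s "def _log_to(" "def _log_to_legacy(").toList
      = W ++ ("def _log_to_legacy(".toList ++ T) := by
    unfold pvReplace1
    rw [PySem.Str.find_eq, ← hL, hfindL, if_neg (by omega), String.toList_ofList]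
    have h1 : L.take ((W.length : Int)).toNat = W := by
      rw [Int.toNat_natCast, ← hWR, List.take_left]
    have h2 : L.drop (((W.length : Int)).toNat + ("def _log_to(".toList).length) = T := by
      rw [Int.toNat_natCast, hlen12, ← hWR, List.drop_append]
      have hz : W.length + 12 - W.length = 12 := by omega
      rw [List.drop_eq_nil_of_le (by omega), hz, ← hT, ← hlen12, List.drop_left, List.nil_append]
    rw [h1, h2, List.append_assoc]
  simp only [pvRenamed]
  split_ifs with hnoqa
  · rw [PySem.Str.startswith_eq, PySem.Str.toList_lstrip, String.toList_append, hrep]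
    have := pv_not_vib_append W (T ++ "  # noqa: F401".toList) hW
    simpa [List.append_assoc] using this
  · rw [PySem.Str.startswith_eq, PySem.Str.toList_lstrip, hrep]
    exact pv_not_vib_append W T hW

-- consequences of the vibed-index hypothesis at a line that is NOT a vibed def
lemma pv_vib_facts (vibed i fv v : Int) (b : Bool) (hb : b = false) (hi : 0 ≤ i)
    (hvge : -1 ≤ v)
    (hv : if fv = 0 then vibed = (if (if b = true then 0 else if v = -1 then -1 else v + 1) = -1
                                  then -1
                                  else i + (if b = true then 0 else if v = -1 then -1 else v + 1))
          else vibed < i) :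
    i ≠ vibed ∧ (if fv = 0 then vibed = (if v = -1 then -1 else (i + 1) + v)
                 else vibed < i + 1) := by
  subst hb
  constructor
  · by_cases h0 : fv = 0
    · rw [if_pos h0] at hv
      split_ifs at hv <;> simp_all <;> omega
    · rw [if_neg h0] at hv
      omega
  · by_cases h0 : fv = 0
    · rw [if_pos h0] at hv
      rw [if_pos h0]
      split_ifs at hv ⊢ <;> simp_all <;> omega
    · rw [if_neg h0] at hv
      rw [if_neg h0]
      omega

lemma pv_main (marker vibed : Int) :
    ∀ (lines : List String) (i fl fv : Int) (inF : Bool),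
      0 ≤ i → 0 ≤ fv →
      (if inF then marker ≤ i
       else marker = i + (if pvFirstIdx pvPM lines = -1 then (lines.length : Int)
                          else pvFirstIdx pvPM lines)) →
      (if fv = 0 then vibed = (if pvFirstIdx pvPV lines = -1 then -1
                               else i + pvFirstIdx pvPV lines)
       else vibed < i) →
      pvA_loop inF fl fv lines = pvBFrom marker vibed i lines := by
  intro lines
  induction lines with
  | nil => intro i fl fv inF hi hfv hm hv; rfl
  | cons ln rest ih =>
    intro i fl fv inF hi hfv hm hv
    have hrge := pvFirstIdx_ge pvPM rest
    have hvge := pvFirstIdx_ge pvPV rest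
    simp only [pvFirstIdx, List.length_cons] at hm hv
    by_cases hM : PySem.Str.isIn "FIXED _log_to IMPLEMENTATION" ln = true
    · -- the marker (or a later) line: the flag is (or becomes) set
      have hMf : pvPM ln = true := hM
      have hle : marker ≤ i := by
        cases inF <;> simp [hMf] at hm <;> omega
      have hnm : ¬ i < marker := by omega
      by_cases hLog : PySem.Str.startswith (PySem.Str.lstrip ln) "def _log_to(" = true
      · -- a _log_to def, but the flag is set: no rename on either side
        have hVln := pv_log_not_vib ln hLog
        obtain ⟨hne, hv'⟩ := pv_vib_facts vibed i fv (pvFirstIdx pvPV rest) (pvPV ln) hVln hi hvge hv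
        have hM2 := hM; have hLog2 := hLog; have hVln2 := hVln
        simp at hM2 hLog2 hVln2
        simp only [pvA_loop, pvBFrom, pvB_rw]
        simp [hM2, hLog2, hVln2, hne, hnm]
        exact ih (i + 1) fl fv true (by omega) hfv (by simp; omega) hv'
      · by_cases hV : PySem.Str.startswith (PySem.Str.lstrip ln) "def vibed(" = true
        · by_cases h0 : fv = 0
          · -- the first vibed def: renamed on both sides
            have hVt : pvPV ln = true := hV
            have hiv : i = vibed := by
              rw [if_pos h0] at hv
              simp [hVt] at hv
              omega
            subst hiv
            have hM2 := hM; have hLog2 := hLog; have hV2 := hV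
            simp at hM2 hLog2 hV2
            simp only [pvA_loop, pvBFrom, pvB_rw, pvRenamed]
            simp [hM2, hLog2, hV2, h0]
            exact ih (i + 1) fl 1 true (by omega) (by omega) (by simp; omega)
              (by rw [if_neg (by omega)]; omega)
          · -- a later vibed def: not renamed
            have hVt : pvPV ln = true := hV
            rw [if_neg h0] at hv
            have hne : ¬ i = vibed := by omega
            have h1 : ¬ (fv + 1 = 1) := by omega
            have hM2 := hM; have hLog2 := hLog; have hV2 := hV
            simp at hM2 hLog2 hV2
            simp only [pvA_loop, pvBFrom, pvB_rw]
            simp [hM2, hLog2, hV2, h1, hne]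
            exact ih (i + 1) fl (fv + 1) true (by omega) (by omega) (by simp; omega)
              (by rw [if_neg (by omega)]; omega)
        · have hVf : pvPV ln = false := Bool.eq_false_iff.mpr hV
          obtain ⟨hne, hv'⟩ := pv_vib_facts vibed i fv (pvFirstIdx pvPV rest) (pvPV ln) hVf hi hvge hv
          have hVb : PySem.Str.startswith (PySem.Str.lstrip ln) "def vibed(" = false := hVf
          have hM2 := hM; have hLog2 := hLog; have hVb2 := hVb
          simp at hM2 hLog2 hVb2
          simp only [pvA_loop, pvBFrom, pvB_rw]
          simp [hM2, hLog2, hVb2, hne]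
          exact ih (i + 1) fl fv true (by omega) hfv (by simp; omega) hv'
    · -- not a marker line: the flag is unchanged
      have hMr : PySem.Str.isIn "FIXED _log_to IMPLEMENTATION" ln = false :=
        Bool.eq_false_iff.mpr hM
      have hMf : pvPM ln = false := hMr
      have hm' : (if inF then marker ≤ i + 1
                  else marker = (i + 1) + (if pvFirstIdx pvPM rest = -1 then (rest.length : Int)
                                           else pvFirstIdx pvPM rest)) := by
        cases inF
        · simp [hMf] at hm ⊢
          split_ifs at hm ⊢ <;> omega
        · simp at hm ⊢
          omega
      by_cases hLog : PySem.Str.startswith (PySem.Str.lstrip ln) "def _log_to(" = true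
      · -- a _log_to def before the marker line: renamed iff the flag is still unset
        have hVln := pv_log_not_vib ln hLog
        obtain ⟨hne, hv'⟩ := pv_vib_facts vibed i fv (pvFirstIdx pvPV rest) (pvPV ln) hVln hi hvge hv
        cases inF with
        | true =>
          simp at hm
          have hnm : ¬ i < marker := by omega
          have hMr2 := hMr; have hLog2 := hLog; have hVln2 := hVln
          simp at hMr2 hLog2 hVln2
          simp only [pvA_loop, pvBFrom, pvB_rw]
          simp [hMr2, hLog2, hVln2, hne, hnm]
          exact ih (i + 1) fl fv true (by omega) hfv (by simp; omega) hv'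
        | false =>
          simp [hMf] at hm
          have hlt : i < marker := by split_ifs at hm <;> omega
          have hVren := pv_renamed_not_vib ln hLog
          have hVren2 : PySem.Str.startswith
              (PySem.Str.lstrip
                (if PySem.Str.isIn "# noqa" (pvReplace1 ln "def _log_to(" "def _log_to_legacy(") = false
                 then pvReplace1 ln "def _log_to(" "def _log_to_legacy(" ++ "  # noqa: F401"
                 else pvReplace1 ln "def _log_to(" "def _log_to_legacy(")) "def vibed(" = false := by
            simpa [pvRenamed] using hVren
          have hMr2 := hMr; have hLog2 := hLog; have hVln2 := hVln; have hVren3 := hVren2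
          simp at hMr2 hLog2 hVln2 hVren3
          simp only [pvA_loop, pvBFrom, pvB_rw, pvRenamed]
          simp [hMr2, hLog2, hlt, hne, hVren3]
          exact ih (i + 1) (fl + 1) fv false (by omega) hfv (by simpa using hm') hv'
      · by_cases hV : PySem.Str.startswith (PySem.Str.lstrip ln) "def vibed(" = true
        · by_cases h0 : fv = 0
          · have hVt : pvPV ln = true := hV
            have hiv : i = vibed := by
              rw [if_pos h0] at hv
              simp [hVt] at hv
              omega
            subst hiv
            have hMr2 := hMr; have hLog2 := hLog; have hV2 := hV
            simp at hMr2 hLog2 hV2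
            simp only [pvA_loop, pvBFrom, pvB_rw, pvRenamed]
            simp [hMr2, hLog2, hV2, h0]
            exact ih (i + 1) fl 1 inF (by omega) (by omega) hm'
              (by rw [if_neg (by omega)]; omega)
          · have hVt : pvPV ln = true := hV
            rw [if_neg h0] at hv
            have hne : ¬ i = vibed := by omega
            have h1 : ¬ (fv + 1 = 1) := by omega
            have hMr2 := hMr; have hLog2 := hLog; have hV2 := hV
            simp at hMr2 hLog2 hV2
            simp only [pvA_loop, pvBFrom, pvB_rw]
            simp [hMr2, hLog2, hV2, h1, hne]
            exact ih (i + 1) fl (fv + 1) inF (by omega) (by omega) hm'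
              (by rw [if_neg (by omega)]; omega)
        · have hVf : pvPV ln = false := Bool.eq_false_iff.mpr hV
          obtain ⟨hne, hv'⟩ := pv_vib_facts vibed i fv (pvFirstIdx pvPV rest) (pvPV ln) hVf hi hvge hv
          have hVb : PySem.Str.startswith (PySem.Str.lstrip ln) "def vibed(" = false := hVf
          have hMr2 := hMr; have hLog2 := hLog; have hVb2 := hVb
          simp at hMr2 hLog2 hVb2
          simp only [pvA_loop, pvBFrom, pvB_rw]
          simp [hMr2, hLog2, hVb2, hne]
          exact ih (i + 1) fl fv inF (by omega) hfv hm' hv'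

-- ===== VERDICT (by name: the statement is the Claim_ definition above) =====
theorem dedupe_noxfile_py_spec : Claim_equal_dedupe_noxfile_py := by
  intro txt _
  unfold Spec_dedupe_noxfile_py dedupe_noxfile_py dedupe_noxfile_py_alt
  simp only
  rw [pvEnum_map]
  congr 1
  apply pv_main
  · exact le_refl 0
  · exact le_refl 0
  · rw [if_neg (by simp)]
    have := pvFirstIdx_ge pvPM (PySem.Str.splitlines txt)
    split_ifs <;> omega
  · rw [if_pos rfl]
    have := pvFirstIdx_ge pvPV (PySem.Str.splitlines txt)
    split_ifs <;> omega
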